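-- pv_equiv track=rewrite | github.com/Ghias54/Earnings-Factor-Model | src/processing/prep/clean_companies.py | is_valid_company
-- ===== SOURCE A (Python) =====
-- ETF_KEYWORDS = [
--     "etf",
--     "fund",
--     "trust",
--     "ishares",
--     "spdr",
--     "vanguard",
--     "proshares",
--     "invesco",
--     "direxion",
--     "ark ",
--     "etn",
--     "adr",
-- ]
--
-- BAD_KEYWORDS = [
--     "acquisition",
--     "capital",
--     "holdings",
--     "units",
--     "rights",
--     "warrants",
--     "corp ii",
--     "corp iii",
-- ]
--
-- def is_valid_company(company_name: str) -> bool: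
--     if not isinstance(company_name, str):
--         return False
--
--     name = company_name.lower()
--
--     # Remove ETFs / funds
--     for keyword in ETF_KEYWORDS:
--         if keyword in name:
--             return False
--
--     # Remove SPACs / junk
--     for keyword in BAD_KEYWORDS:
--         if keyword in name:
--             return False
--
--     return True
-- ===== SOURCE B (Python) =====
-- import re
--
-- ETF_KEYWORDS = [
--     "etf", "fund", "trust", "ishares", "spdr", "vanguard",
--     "proshares", "invesco", "direxion", "ark ", "etn", "adr",
-- ]
--
-- BAD_KEYWORDS = [
--     "acquisition", "capital", "holdings", "units",
--     "rights", "warrants", "corp ii", "corp iii",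
-- ]
--
-- _PATTERN = re.compile("|".join(re.escape(k) for k in ETF_KEYWORDS + BAD_KEYWORDS))
--
-- def is_valid_company(company_name: str) -> bool:
--     if not isinstance(company_name, str):
--         return False
--     return _PATTERN.search(company_name.lower()) is None
-- ===== Notes on version B (the rewrite author's own statement) =====
-- stated objective: idiomatic
-- what changed: A runs 20 independent per-keyword substring searches in two sequential loops with early returns; B compiles all keywords into one alternation regex at module load and decides validity with a single search over the lowercased name.
import Mathlib
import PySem

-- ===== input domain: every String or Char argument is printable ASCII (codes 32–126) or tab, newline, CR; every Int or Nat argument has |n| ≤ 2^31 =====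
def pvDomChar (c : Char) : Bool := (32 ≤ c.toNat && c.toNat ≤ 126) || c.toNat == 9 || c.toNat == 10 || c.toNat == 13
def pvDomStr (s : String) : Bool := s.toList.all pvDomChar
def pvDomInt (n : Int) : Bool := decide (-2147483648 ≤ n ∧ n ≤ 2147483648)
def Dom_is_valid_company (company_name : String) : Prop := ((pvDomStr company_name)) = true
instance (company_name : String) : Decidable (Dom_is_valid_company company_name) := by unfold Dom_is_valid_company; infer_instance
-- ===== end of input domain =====

-- B replaces A's two per-keyword loops (one substring search each, early return) by one
-- precompiled alternation regex over all keywords and a single search call (idiomatic).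

-- ===== PORT A =====
def etfKeywords : List String :=
  ["etf", "fund", "trust", "ishares", "spdr", "vanguard",
   "proshares", "invesco", "direxion", "ark ", "etn", "adr"]

def badKeywords : List String :=
  ["acquisition", "capital", "holdings", "units",
   "rights", "warrants", "corp ii", "corp iii"]

-- A's 'for keyword in …: if keyword in name: return False' loop
def aLoop (kws : List String) (name : List Char) : Bool :=
  match kws with
  | [] => true
  | k :: rest => if PySem.Chars.isIn k.toList name then false else aLoop rest name

def is_valid_company (company_name : String) : Bool :=
  let name := (PySem.Str.lower company_name).toList
  if aLoop etfKeywords name then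
    if aLoop badKeywords name then true else false
  else false

-- ===== PORT B =====
-- Port of the library call `_PATTERN.search(name)` for the pattern 'kw1|kw2|…' with
-- literal (re.escape'd) keywords: a left-to-right leftmost scan that at each position
-- tries each alternative of the alternation; returns true iff the search finds a match.
def reSearchAlt (kws : List String) (name : List Char) : Bool :=
  match name with
  | [] => kws.any (fun k => PySem.Chars.startswith [] k.toList)
  | c :: rest =>
      kws.any (fun k => PySem.Chars.startswith (c :: rest) k.toList) || reSearchAlt kws rest

-- B: 'return _PATTERN.search(company_name.lower()) is None'
def is_valid_company_alt (company_name : String) : Bool :=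
  let name := (PySem.Str.lower company_name).toList
  !(reSearchAlt (etfKeywords ++ badKeywords) name)

-- ===== PRECONDITION & SPEC =====
def Spec_is_valid_company (company_name : String) (out : Bool) : Prop := out = is_valid_company_alt company_name
instance (company_name : String) (out : Bool) : Decidable (Spec_is_valid_company company_name out) := by unfold Spec_is_valid_company; infer_instance

-- ===== CLAIM (what is proved, stated in full; the proofs are below) =====
def Claim_equal_is_valid_company : Prop := ∀ (company_name : String), Dom_is_valid_company company_name → Spec_is_valid_company company_name (is_valid_company company_name)

-- ===== LEMMAS AND PROOFS =====

theorem aLoop_eq_not_any (kws : List String) (name : List Char) :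
    aLoop kws name = !(kws.any (fun k => PySem.Chars.isIn k.toList name)) := by
  induction kws with
  | nil => simp [aLoop]
  | cons k rest ih =>
      simp only [aLoop, List.any_cons, Bool.not_or]
      split_ifs with h <;> simp [h, ih]

theorem reSearchAlt_eq_any_isIn (kws : List String) (name : List Char) :
    reSearchAlt kws name = kws.any (fun k => PySem.Chars.isIn k.toList name) := by
  induction name with
  | nil =>
      simp only [reSearchAlt]
      congr 1
      funext k
      rw [Bool.eq_iff_iff, PySem.Chars.startswith_iff]
      constructor
      · intro h
        have : k.toList = [] := List.prefix_nil.mp h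
        simp [this, PySem.Chars.isIn_nil]
      · intro h
        have hinf := (PySem.Chars.isIn_iff_infix (sub := k.toList) (s := [])).mp h
        rw [List.infix_nil.mp hinf]
  | cons c rest ih =>
      simp only [reSearchAlt, ih]
      rw [Bool.eq_iff_iff]
      simp only [Bool.or_eq_true, List.any_eq_true, PySem.Chars.startswith_iff,
        PySem.Chars.isIn_iff_infix, List.infix_cons_iff]
      constructor
      · rintro (⟨k, hk, hp⟩ | ⟨k, hk, hi⟩)
        · exact ⟨k, hk, Or.inl hp⟩
        · exact ⟨k, hk, Or.inr hi⟩
      · rintro ⟨k, hk, hp | hi⟩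
        · exact Or.inl ⟨k, hk, hp⟩
        · exact Or.inr ⟨k, hk, hi⟩

-- ===== VERDICT (by name: the statement is the Claim_ definition above) =====
theorem is_valid_company_spec : Claim_equal_is_valid_company := by
  intro s _
  unfold Spec_is_valid_company
  simp only [is_valid_company, is_valid_company_alt, reSearchAlt_eq_any_isIn, aLoop_eq_not_any,
    List.any_append]
  cases h1 : etfKeywords.any (fun k => PySem.Chars.isIn k.toList (PySem.Str.lower s).toList) <;>
  cases h2 : badKeywords.any (fun k => PySem.Chars.isIn k.toList (PySem.Str.lower s).toList) <;> simp
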